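-- pv_equiv track=rewrite | github.com/bob686868/Leetcode-100-day-challenge- | day22.py | max_num_of_points_with_cost
-- ===== SOURCE A (Python) =====
-- def max_num_of_points_with_cost(points):
--     prev_dp=points[-1]
--
--     for i in range(len(points)-2,-1,-1):
--         dp=[float('-inf')]*len(points[0])
--         for j in range(len(points[0])):
--             for k in range(len(points[0])):
--                 dp[j]=max(dp[j],points[i][j]+prev_dp[k]-abs(k-j))
--         prev_dp=dp
--
--
--     return max(prev_dp)
-- ===== SOURCE B (Python) =====
-- def max_num_of_points_with_cost(points):
--     n = len(points[0])
--     best = points[-1][:n]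
--     for row in reversed(points[:-1]):
--         left = []
--         cur = None
--         for v in best:
--             cur = v if cur is None else max(v, cur - 1)
--             left.append(cur)
--         right = []
--         cur = None
--         for v in reversed(best):
--             cur = v if cur is None else max(v, cur - 1)
--             right.append(cur)
--         right.reverse()
--         best = [row[j] + max(left[j], right[j]) for j in range(n)]
--     return max(best)
-- ===== Notes on version B (the rewrite author's own statement) =====
-- stated objective: faster
-- what changed: Replaced the O(n^2)-per-row inner max over all columns k of prev[k]-|k-j| by two directional prefix-maximum sweeps (left-to-right and right-to-left with a -1 decay), making each row O(n).
import Mathlib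
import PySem

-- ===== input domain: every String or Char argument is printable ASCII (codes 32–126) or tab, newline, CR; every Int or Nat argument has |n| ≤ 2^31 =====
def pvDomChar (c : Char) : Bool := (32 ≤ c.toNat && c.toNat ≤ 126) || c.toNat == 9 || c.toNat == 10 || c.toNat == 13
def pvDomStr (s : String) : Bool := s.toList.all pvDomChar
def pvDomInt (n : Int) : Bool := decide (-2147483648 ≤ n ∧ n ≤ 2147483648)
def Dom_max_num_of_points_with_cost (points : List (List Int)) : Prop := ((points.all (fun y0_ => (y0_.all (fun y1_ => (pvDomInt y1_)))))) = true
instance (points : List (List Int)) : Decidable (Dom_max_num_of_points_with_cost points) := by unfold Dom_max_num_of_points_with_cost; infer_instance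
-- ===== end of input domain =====

-- B replaces A's O(n^2)-per-row inner maximum over all columns by two linear
-- prefix-maximum sweeps per row (asymptotically faster, measured faster).

-- ===== PORT A =====
-- one iteration of A's outer loop: dp[j] = max over k of points[i][j] + prev[k] - |k - j|
def pvRowA (points : List (List Int)) (n : Nat) (prev : List Int) (i : Int) : List Int :=
  (List.range n).map (fun (j : Nat) =>
    ((List.range n).foldl (fun (acc : Option Int) (k : Nat) =>
        let v := PySem.List.pyGetD (PySem.List.pyGetD points i []) (j : Int) 0
                 + PySem.List.pyGetD prev (k : Int) 0 - |(k : Int) - (j : Int)|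
        some (match acc with | none => v | some a => max a v)) none).getD 0)

def max_num_of_points_with_cost (points : List (List Int)) : Int :=
  let n := (PySem.List.pyGetD points 0 []).length
  let final := (PySem.List.pyRange ((points.length : Int) - 2) (-1) (-1)).foldl
    (pvRowA points n) (PySem.List.pyGetD points (-1) [])
  (PySem.List.max? final (fun x => x)).getD 0

-- ===== PORT B =====
-- the running-maximum sweep: cur = v if cur is None else max(v, cur - 1)
def pvSweep : Option Int → List Int → List Int
  | _, [] => []
  | none, v :: t => v :: pvSweep (some v) t
  | some c, v :: t => max v (c - 1) :: pvSweep (some (max v (c - 1))) t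

-- one iteration of B's loop: best[j] = row[j] + max(left[j], right[j])
def pvRowB (n : Nat) (best row : List Int) : List Int :=
  let left := pvSweep none best
  let right := (pvSweep none best.reverse).reverse
  (List.range n).map (fun (j : Nat) =>
    PySem.List.pyGetD row (j : Int) 0 + max (left.getD j 0) (right.getD j 0))

def max_num_of_points_with_cost_alt (points : List (List Int)) : Int :=
  let n := (PySem.List.pyGetD points 0 []).length
  let final := (PySem.List.slice points none (some (-1))).reverse.foldl
    (pvRowB n)
    (PySem.List.slice (PySem.List.pyGetD points (-1) []) none (some (n : Int)))
  (PySem.List.max? final (fun x => x)).getD 0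

-- ===== PRECONDITION & SPEC =====
-- Pre_ is exactly where the Python A returns: a nonempty grid, a nonempty first
-- row, and every row at least as long as the first (A indexes each row and the
-- last row at columns 0..len(points[0])-1 and raises IndexError otherwise;
-- max([]) raises ValueError when the first row is empty).
def Pre_max_num_of_points_with_cost (points : List (List Int)) : Prop :=
  points ≠ [] ∧ 0 < (points.getD 0 []).length ∧
    ∀ r ∈ points, (points.getD 0 []).length ≤ r.length
instance (points : List (List Int)) : Decidable (Pre_max_num_of_points_with_cost points) := by
  unfold Pre_max_num_of_points_with_cost; infer_instance

def pvWitness_max_num_of_points_with_cost : List (List Int) := [[1, 2], [3, 4]]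

def Spec_max_num_of_points_with_cost (points : List (List Int)) (out : Int) : Prop := out = max_num_of_points_with_cost_alt points
instance (points : List (List Int)) (out : Int) : Decidable (Spec_max_num_of_points_with_cost points out) := by unfold Spec_max_num_of_points_with_cost; infer_instance

-- ===== CLAIM (what is proved, stated in full; the proofs are below) =====
def Claim_equal_max_num_of_points_with_cost : Prop := ∀ (points : List (List Int)), Dom_max_num_of_points_with_cost points → Pre_max_num_of_points_with_cost points → Spec_max_num_of_points_with_cost points (max_num_of_points_with_cost points)

-- ===== LEMMAS AND PROOFS =====

-- max over a prefix with decay: pvL h j = max_{k ≤ j} (h k - (j - k))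
def pvL (h : Nat → Int) : Nat → Int
  | 0 => h 0
  | j + 1 => max (h (j + 1)) (pvL h j - 1)

-- max over a window with decay: pvR h j d = max_{j ≤ k ≤ j+d} (h k - (k - j))
def pvR (h : Nat → Int) : Nat → Nat → Int
  | j, 0 => h j
  | j, d + 1 => max (h j) (pvR h (j + 1) d - 1)

-- running max over 0..m
def pvM (h : Nat → Int) : Nat → Int
  | 0 => h 0
  | m + 1 => max (pvM h m) (h (m + 1))

lemma pvM_congr (h h' : Nat → Int) : ∀ m, (∀ k, k ≤ m → h k = h' k) → pvM h m = pvM h' m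
  | 0, H => by simp [pvM, H 0 (by omega)]
  | m + 1, H => by
      simp [pvM, pvM_congr h h' m (fun k hk => H k (by omega)), H (m + 1) (by omega)]

lemma pvM_sub (h : Nat → Int) (c : Int) : ∀ m, pvM (fun k => h k - c) m = pvM h m - c
  | 0 => by simp [pvM]
  | m + 1 => by simp [pvM, pvM_sub h c m, Int.sub_max_sub_right]

lemma pvM_add (h : Nat → Int) (c : Int) : ∀ m, pvM (fun k => c + h k) m = c + pvM h m
  | 0 => by simp [pvM]
  | m + 1 => by simp [pvM, pvM_add h c m, Int.max_add_left]

lemma pvL_congr (h h' : Nat → Int) : ∀ j, (∀ k, k ≤ j → h k = h' k) → pvL h j = pvL h' j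
  | 0, H => by simp [pvL, H 0 (by omega)]
  | j + 1, H => by
      simp [pvL, pvL_congr h h' j (fun k hk => H k (by omega)), H (j + 1) (by omega)]

lemma pvR_congr (h h' : Nat → Int) : ∀ d j, (∀ k, j ≤ k → k ≤ j + d → h k = h' k) → pvR h j d = pvR h' j d
  | 0, j, H => by simp [pvR, H j (by omega) (by omega)]
  | d + 1, j, H => by
      simp [pvR, pvR_congr h h' d (j + 1) (fun k h1 h2 => H k (by omega) (by omega)),
        H j (by omega) (by omega)]

lemma pvL_corr (h : Nat → Int) : ∀ (j : Nat), pvM (fun k => h k - ((j : Int) - k)) j = pvL h j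
  | 0 => by simp [pvM, pvL]
  | j + 1 => by
      have hcg : pvM (fun k => h k - (((j + 1 : Nat) : Int) - k)) j
          = pvM (fun k => (h k - ((j : Int) - k)) - 1) j := by
        apply pvM_congr
        intro k hk
        push_cast
        ring
      simp only [pvM, pvL, hcg, pvM_sub, pvL_corr h j]
      have : ((j + 1 : Nat) : Int) - ((j + 1 : Nat) : Int) = 0 := by ring
      rw [this, sub_zero, max_comm]

lemma pvR_ext (h : Nat → Int) : ∀ d j, pvR h j (d + 1) = max (pvR h j d) (h (j + d + 1) - (d + 1))
  | 0, j => by simp [pvR]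
  | d + 1, j => by
      conv_lhs => rw [pvR]
      rw [pvR_ext h d (j + 1), ← Int.sub_max_sub_right, ← max_assoc]
      conv_rhs => rw [pvR]
      have h1 : j + 1 + d + 1 = j + (d + 1) + 1 := by omega
      rw [h1]
      congr 1
      push_cast
      ring

-- the crux: the two-sided decayed maximum splits into prefix and suffix sweeps
lemma pvMain (h : Nat → Int) (j : Nat) : ∀ m, j ≤ m →
    pvM (fun k => h k - |(k : Int) - (j : Int)|) m = max (pvL h j) (pvR h j (m - j))
  | 0, hj => by
      obtain rfl : j = 0 := by omega
      simp [pvM, pvL, pvR]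
  | m + 1, hj => by
      by_cases hjm : j ≤ m
      · have IH := pvMain h j m hjm
        have habs : |((m + 1 : Nat) : Int) - (j : Int)| = ((m - j : Nat) : Int) + 1 := by
          rw [abs_of_nonneg (by push_cast; omega)]
          push_cast [Nat.cast_sub hjm]
          ring
        have hidx : m + 1 - j = (m - j) + 1 := by omega
        have hidx2 : j + (m - j) + 1 = m + 1 := by omega
        simp only [pvM, IH, habs, hidx, pvR_ext h (m - j) j, hidx2, max_assoc]
      · obtain rfl : j = m + 1 := by omega
        have hcg : pvM (fun k => h k - |(k : Int) - ((m + 1 : Nat) : Int)|) m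
            = pvM (fun k => (h k - ((m : Int) - k)) - 1) m := by
          apply pvM_congr
          intro k hk
          rw [abs_of_nonpos (by push_cast; omega)]
          push_cast
          ring
        simp only [pvM, hcg, pvM_sub, pvL_corr h m]
        have habs0 : |((m + 1 : Nat) : Int) - ((m + 1 : Nat) : Int)| = 0 := by simp
        rw [habs0, sub_zero]
        have : m + 1 - (m + 1) = 0 := by omega
        rw [this]
        show max (pvL h m - 1) (h (m + 1)) = max (pvL h (m + 1)) (pvR h (m + 1) 0)
        simp only [pvL, pvR]
        rw [max_right_comm, max_self, max_comm]

lemma pvRev (h : Nat → Int) : ∀ s c, s ≤ c → pvL (fun t => h (c - t)) s = pvR h (c - s) s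
  | 0, c, _ => by simp [pvL, pvR]
  | s + 1, c, hsc => by
      have IH := pvRev h s c (by omega)
      have h1 : c - s - 1 + 1 = c - s := by omega
      have h2 : c - (s + 1) = c - s - 1 := by omega
      simp only [pvL, IH, pvR, h2, h1]

lemma pvFoldMax (f : Nat → Int) : ∀ m,
    (List.range (m + 1)).foldl (fun (acc : Option Int) k =>
        let v := f k
        some (match acc with | none => v | some a => max a v)) none = some (pvM f m)
  | 0 => by simp [List.range_succ, pvM]
  | m + 1 => by
      rw [List.range_succ, List.foldl_append, pvFoldMax f m]
      simp [pvM]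

lemma pvSweep_length : ∀ (o : Option Int) (l : List Int), (pvSweep o l).length = l.length
  | _, [] => by cases ‹Option Int› <;> rfl
  | none, v :: t => by simp [pvSweep, pvSweep_length (some v) t]
  | some c, v :: t => by simp [pvSweep, pvSweep_length (some (max v (c - 1))) t]

lemma pvL_shift (g' h : Nat → Int) (h0 : g' 0 = pvL h 1) (hs : ∀ k, g' (k + 1) = h (k + 2)) :
    ∀ j, pvL g' j = pvL h (j + 1)
  | 0 => by simpa [pvL] using h0
  | j + 1 => by
      have IH := pvL_shift g' h h0 hs j
      simp only [pvL, IH, hs j]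

lemma pvSweep_some_getD : ∀ (l : List Int) (c : Int) (j : Nat), j < l.length →
    (pvSweep (some c) l).getD j 0 = pvL (fun k => (c :: l).getD k 0) (j + 1)
  | [], c, j, hj => by simp at hj
  | v :: t, c, 0, hj => by simp [pvSweep, pvL, List.getD]
  | v :: t, c, j + 1, hj => by
      have IH := pvSweep_some_getD t (max v (c - 1)) j (by simpa using hj)
      simp only [pvSweep, List.getD_cons_succ, IH]
      apply pvL_shift
      · simp [pvL, List.getD]
      · intro k
        simp [List.getD]

lemma pvSweep_none_getD : ∀ (l : List Int) (j : Nat), j < l.length →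
    (pvSweep none l).getD j 0 = pvL (fun k => l.getD k 0) j
  | [], j, hj => by simp at hj
  | v :: t, 0, hj => by simp [pvSweep, pvL, List.getD]
  | v :: t, j + 1, hj => by
      have IH := pvSweep_some_getD t v j (by simpa using hj)
      simp only [pvSweep, List.getD_cons_succ, IH]

lemma pvSweep_rev_getD (l : List Int) (j : Nat) (hj : j < l.length) :
    ((pvSweep none l.reverse).reverse).getD j 0 = pvR (fun k => l.getD k 0) j (l.length - 1 - j) := by
  have hsl : (pvSweep none l.reverse).length = l.length := by
    rw [pvSweep_length, List.length_reverse]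
  have h1 : ((pvSweep none l.reverse).reverse).getD j 0
      = (pvSweep none l.reverse).getD (l.length - 1 - j) 0 := by
    rw [List.getD_eq_getElem?_getD, List.getD_eq_getElem?_getD,
      List.getElem?_reverse (by omega), hsl]
  rw [h1, pvSweep_none_getD l.reverse (l.length - 1 - j) (by simp; omega)]
  have h2 : pvL (fun k => l.reverse.getD k 0) (l.length - 1 - j)
      = pvL (fun t => l.getD (l.length - 1 - t) 0) (l.length - 1 - j) := by
    apply pvL_congr
    intro k hk
    rw [List.getD_eq_getElem?_getD, List.getD_eq_getElem?_getD,
      List.getElem?_reverse (by omega)]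
  rw [h2, pvRev (fun k => l.getD k 0) (l.length - 1 - j) (l.length - 1) (by omega)]
  congr 1
  omega

-- one row of A equals one row of B (B keeps only the first n entries of the state)
lemma pvRow_eq (points : List (List Int)) (n : Nat) (prev : List Int) (i : Int)
    (hn : 0 < n) (hp : n ≤ prev.length) :
    pvRowA points n prev i = pvRowB n (prev.take n) (PySem.List.pyGetD points i []) := by
  obtain ⟨m, rfl⟩ : ∃ m, n = m + 1 := ⟨n - 1, by omega⟩
  simp only [pvRowA, pvRowB]
  apply List.map_congr_left
  intro j hj
  rw [List.mem_range] at hj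
  set row := PySem.List.pyGetD points i [] with hrow
  rw [pvFoldMax (fun k => PySem.List.pyGetD row (j : Int) 0
      + PySem.List.pyGetD prev (k : Int) 0 - |(k : Int) - (j : Int)|) m, Option.getD_some]
  have htake_len : (prev.take (m + 1)).length = m + 1 := by rw [List.length_take]; omega
  have hA : pvM (fun k => PySem.List.pyGetD row (j : Int) 0
        + PySem.List.pyGetD prev (k : Int) 0 - |(k : Int) - (j : Int)|) m
      = PySem.List.pyGetD row (j : Int) 0
        + max (pvL (fun k => prev.getD k 0) j) (pvR (fun k => prev.getD k 0) j (m - j)) := by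
    rw [pvM_congr _ (fun k => PySem.List.pyGetD row (j : Int) 0
        + (prev.getD k 0 - |(k : Int) - (j : Int)|)) m ?_]
    · rw [pvM_add, pvMain (fun k => prev.getD k 0) j m (by omega)]
    · intro k hk
      simp only [PySem.List.pyGetD_natCast]
      ring
  rw [hA]
  have hL : (pvSweep none (prev.take (m + 1))).getD j 0 = pvL (fun k => prev.getD k 0) j := by
    rw [pvSweep_none_getD _ j (by omega)]
    apply pvL_congr
    intro k hk
    rw [List.getD_eq_getElem?_getD, List.getD_eq_getElem?_getD,
      List.getElem?_take_of_lt (by omega)]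
  have hR : ((pvSweep none (prev.take (m + 1)).reverse).reverse).getD j 0
      = pvR (fun k => prev.getD k 0) j (m - j) := by
    rw [pvSweep_rev_getD _ j (by omega), htake_len]
    have h3 : m + 1 - 1 - j = m - j := by omega
    rw [h3]
    apply pvR_congr
    intro k h1 h2
    rw [List.getD_eq_getElem?_getD, List.getD_eq_getElem?_getD,
      List.getElem?_take_of_lt (by omega)]
  rw [hL, hR]

lemma pvRowA_length (points : List (List Int)) (n : Nat) (prev : List Int) (i : Int) :
    (pvRowA points n prev i).length = n := by
  simp [pvRowA]

lemma pvLoop_eq (points : List (List Int)) (n : Nat) (hn : 0 < n) :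
    ∀ (idxs : List Nat) (prev : List Int), n ≤ prev.length →
      idxs.foldl (fun best (k : Nat) => pvRowB n best (points.getD k [])) (prev.take n)
        = (idxs.foldl (fun pv (k : Nat) => pvRowA points n pv (k : Int)) prev).take n
  | [], prev, hp => by simp
  | i :: t, prev, hp => by
      simp only [List.foldl_cons]
      have h2 := pvRow_eq points n prev (i : Int) hn hp
      rw [PySem.List.pyGetD_natCast] at h2
      have h1 : pvRowB n (prev.take n) (points.getD i [])
          = (pvRowA points n prev (i : Int)).take n := by
        rw [List.take_of_length_le (le_of_eq (pvRowA_length points n prev (i : Int))), ← h2]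
      rw [h1]
      exact pvLoop_eq points n hn t _ (le_of_eq (pvRowA_length points n prev (i : Int)).symm)

lemma pvLoopA_length (points : List (List Int)) (n : Nat) :
    ∀ (idxs : List Nat) (prev : List Int), prev.length = n →
      (idxs.foldl (fun pv (k : Nat) => pvRowA points n pv (k : Int)) prev).length = n
  | [], prev, h => by simpa using h
  | i :: t, prev, h => by
      simp only [List.foldl_cons]
      exact pvLoopA_length points n t _ (pvRowA_length points n prev (i : Int))

lemma pvDropLast_rev (l : List (List Int)) :
    l.dropLast.reverse = (List.range (l.length - 1)).map (fun k => l.getD (l.length - 2 - k) []) := by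
  apply List.ext_getElem
  · simp
  · intro i h1 h2
    simp only [List.length_reverse, List.length_dropLast] at h1
    simp only [List.getElem_reverse, List.getElem_map, List.getElem_range]
    rw [List.getElem_dropLast]
    have hi : l.length - 2 - i < l.length := by omega
    rw [List.getD_eq_getElem?_getD, List.getElem?_eq_getElem hi, Option.getD_some]
    congr 1
    simp only [List.length_dropLast]
    omega

-- ===== VERDICT (by name: the statement is the Claim_ definition above) =====
theorem max_num_of_points_with_cost_spec : Claim_equal_max_num_of_points_with_cost := by
  intro points _hdom hpre
  obtain ⟨hne, hn0, hrows⟩ := hpre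
  have hlen1 : 0 < points.length := List.length_pos_iff.mpr hne
  unfold Spec_max_num_of_points_with_cost
  simp only [max_num_of_points_with_cost, max_num_of_points_with_cost_alt]
  rw [PySem.List.pyGetD_neg_one points [] hne, PySem.List.slice_to_neg_one, PySem.List.slice_to_natCast,
    PySem.List.pyRange_neg_one]
  set n := (PySem.List.pyGetD points 0 []).length with hn
  have hn0' : 0 < n := by
    rw [hn, PySem.List.pyGetD_zero]
    exact hn0
  have htn : (((points.length : Int) - 2) - (-1)).toNat = points.length - 1 := by omega
  rw [htn, List.foldl_map, pvDropLast_rev points, List.foldl_map]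
  have hcongr : List.foldl (fun pv (k : Nat) => pvRowA points n pv ((points.length : Int) - 2 - (k : Int)))
        (points.getLast hne) (List.range (points.length - 1))
      = List.foldl (fun pv (k : Nat) => pvRowA points n pv ((points.length - 2 - k : Nat) : Int))
        (points.getLast hne) (List.range (points.length - 1)) := by
    apply PySem.List.foldl_congr_mem
    intro pv k hk
    rw [List.mem_range] at hk
    congr 1
    omega
  rw [hcongr]
  rw [show (List.range (points.length - 1)).foldl (fun pv (k : Nat) =>
        pvRowA points n pv ((points.length - 2 - k : Nat) : Int)) (points.getLast hne)
      = ((List.range (points.length - 1)).map (fun k => points.length - 2 - k)).foldl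
          (fun pv (k : Nat) => pvRowA points n pv (k : Int)) (points.getLast hne) from
      (List.foldl_map (f := fun k => points.length - 2 - k)
        (g := fun pv (k : Nat) => pvRowA points n pv (k : Int))).symm]
  rw [show (List.range (points.length - 1)).foldl (fun best (k : Nat) =>
        pvRowB n best (points.getD (points.length - 2 - k) [])) ((points.getLast hne).take n)
      = ((List.range (points.length - 1)).map (fun k => points.length - 2 - k)).foldl
          (fun best (k : Nat) => pvRowB n best (points.getD k [])) ((points.getLast hne).take n) from
      (List.foldl_map (f := fun k => points.length - 2 - k)
        (g := fun best (k : Nat) => pvRowB n best (points.getD k []))).symm]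
  have hlastlen : n ≤ (points.getLast hne).length := by
    rw [hn, PySem.List.pyGetD_zero]
    exact hrows _ (List.getLast_mem hne)
  rw [pvLoop_eq points n hn0' _ _ hlastlen]
  have hF : (((List.range (points.length - 1)).map (fun k => points.length - 2 - k)).foldl
        (fun pv (k : Nat) => pvRowA points n pv (k : Int)) (points.getLast hne)).take n
      = ((List.range (points.length - 1)).map (fun k => points.length - 2 - k)).foldl
        (fun pv (k : Nat) => pvRowA points n pv (k : Int)) (points.getLast hne) := by
    by_cases h2 : points.length = 1
    · obtain ⟨p0, rfl⟩ : ∃ p0, points = [p0] := by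
        cases points with
        | nil => exact absurd rfl hne
        | cons p0 t =>
            cases t with
            | nil => exact ⟨p0, rfl⟩
            | cons b t' => simp at h2
      have hmap : (List.range ([p0].length - 1)).map (fun k => [p0].length - 2 - k) = [] := by
        simp
      rw [hmap]
      simp only [List.foldl_nil]
      apply List.take_of_length_le
      rw [hn, PySem.List.pyGetD_zero]
      simp [List.getD]
    · have hge2 : 2 ≤ points.length := by omega
      cases hidx : (List.range (points.length - 1)).map (fun k => points.length - 2 - k) with
      | nil =>
          exfalso
          have : ((List.range (points.length - 1)).map
              (fun k => points.length - 2 - k)).length = points.length - 1 := by simp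
          rw [hidx] at this
          simp at this
          omega
      | cons i t =>
          simp only [List.foldl_cons]
          exact List.take_of_length_le (le_of_eq
            (pvLoopA_length points n t _ (pvRowA_length points n (points.getLast hne) (i : Int))))
  rw [hF]
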